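-- pv_equiv track=rewrite | github.com/dasha-pn/algorithmic-problems-python | palindromic_anagrams.py | count_palindromic_anagrams
-- ===== SOURCE A (Python) =====
-- def count_palindromic_anagrams(text: str) -> int:
--     """Count how many words in the given text can be rearranged to form a palindrome.
--
--     A word can be rearranged to form a palindrome if at most one character has an odd frequency.
--
--     Args:
--         text (str): A string containing words separated by spaces."""
--
--     counter = 0
--
--     for word in text.split():
--         char_counter = {}
--         for char in word:
--             char_counter[char] = char_counter.get(char, 0) + 1
--
--         odd_count = sum(1 for count in char_counter.values() if count % 2 != 0)
--         if odd_count <= 1: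
--             counter += 1
--     return counter
-- ===== SOURCE B (Python) =====
-- def count_palindromic_anagrams(text: str) -> int:
--     counter = 0
--     for word in text.split():
--         odd = 0
--         run = 0
--         prev = None
--         for c in sorted(word):
--             if c == prev:
--                 run += 1
--             else:
--                 odd += run % 2
--                 run = 1
--                 prev = c
--         odd += run % 2
--         if odd <= 1:
--             counter += 1
--     return counter
-- ===== Notes on version B (the rewrite author's own statement) =====
-- stated objective: alternative
-- what changed: Instead of building a per-word character-count dictionary and then scanning its values for odd counts, B sorts each word and makes one run-length scan over the sorted characters, counting runs of odd length; this works because in a sorted word the occurrences of each character are contiguous, so odd-length runs are exactly the characters with odd frequency.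
import Mathlib
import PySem

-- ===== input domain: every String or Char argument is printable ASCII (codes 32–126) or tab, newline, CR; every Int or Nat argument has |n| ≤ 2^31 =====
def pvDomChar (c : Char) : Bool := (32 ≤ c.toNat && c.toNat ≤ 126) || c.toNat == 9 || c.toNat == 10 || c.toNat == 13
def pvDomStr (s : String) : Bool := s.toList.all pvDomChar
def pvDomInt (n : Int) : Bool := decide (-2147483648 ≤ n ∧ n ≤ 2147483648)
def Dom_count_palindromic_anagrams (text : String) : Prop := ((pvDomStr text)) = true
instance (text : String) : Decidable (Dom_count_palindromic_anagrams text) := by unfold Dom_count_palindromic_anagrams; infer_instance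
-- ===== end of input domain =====

-- B replaces A's per-word count dictionary plus trailing odd-values scan by sorting each
-- word and counting odd-length runs in one scan over the sorted characters (objective:
-- alternative algorithm; in a sorted word each character's occurrences are contiguous,
-- so odd-length runs are exactly the characters of odd frequency).

-- ===== PORT A =====
def count_palindromic_anagrams (text : String) : Int :=
  (PySem.Str.split₀ text).foldl (fun counter word =>
    let char_counter : PySem.Dict Char Int :=
      word.toList.foldl (fun d c => d.insert c (d.getD c 0 + 1)) PySem.Dict.empty
    let odd_count : Int := ((char_counter.values.filter (fun n => n % 2 != 0)).length : Int)
    if odd_count ≤ 1 then counter + 1 else counter) 0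

-- ===== PORT B =====
-- state (odd, run, prev); prev : Option Char (None initially)
def count_palindromic_anagrams_alt (text : String) : Int :=
  (PySem.Str.split₀ text).foldl (fun counter word =>
    let st :=
      (PySem.List.sorted word.toList (fun c => c) false).foldl
        (fun (st : Int × Int × Option Char) c =>
          if some c = st.2.2 then (st.1, st.2.1 + 1, st.2.2)
          else (st.1 + st.2.1 % 2, 1, some c)) (0, 0, none)
    let odd := st.1 + st.2.1 % 2
    if odd ≤ 1 then counter + 1 else counter) 0

-- ===== PRECONDITION & SPEC =====
def Spec_count_palindromic_anagrams (text : String) (out : Int) : Prop := out = count_palindromic_anagrams_alt text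
instance (text : String) (out : Int) : Decidable (Spec_count_palindromic_anagrams text out) := by unfold Spec_count_palindromic_anagrams; infer_instance

-- ===== CLAIM (what is proved, stated in full; the proofs are below) =====
def Claim_equal_count_palindromic_anagrams : Prop := ∀ (text : String), Dom_count_palindromic_anagrams text → Spec_count_palindromic_anagrams text (count_palindromic_anagrams text)

-- ===== LEMMAS AND PROOFS =====

-- step function of B's inner loop (definitionally the lambda in the port)
def pvStep (st : Int × Int × Option Char) (c : Char) : Int × Int × Option Char :=
  if some c = st.2.2 then (st.1, st.2.1 + 1, st.2.2)
  else (st.1 + st.2.1 % 2, 1, some c)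

-- B's per-word result from a given state
def pvScan (s : List Char) (st : Int × Int × Option Char) : Int :=
  let f := s.foldl pvStep st
  f.1 + f.2.1 % 2

-- number of distinct characters of odd multiplicity
def pvOdd (s : List Char) : Nat :=
  (s.toFinset.filter (fun c => s.count c % 2 = 1)).card

-- the same, ignoring the character a (the currently open run)
def pvOddA (s : List Char) (a : Char) : Nat :=
  ((s.toFinset.erase a).filter (fun c => s.count c % 2 = 1)).card

lemma pvOddA_of_not_mem (s : List Char) (a : Char) (h : a ∉ s) : pvOddA s a = pvOdd s := by
  unfold pvOddA pvOdd
  rw [Finset.erase_eq_of_notMem (by simpa using h)]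

lemma pvOdd_cons (b : Char) (t : List Char) :
    pvOdd (b :: t) = (if (t.count b + 1) % 2 = 1 then 1 else 0) + pvOddA t b := by
  unfold pvOdd pvOddA
  have hset : (b :: t).toFinset = insert b (t.toFinset.erase b) := by
    ext c; simp; tauto
  rw [hset, Finset.filter_insert]
  have hcb : (b :: t).count b = t.count b + 1 := by simp
  have hcongr : ∀ c ∈ t.toFinset.erase b,
      ((b :: t).count c % 2 = 1) = (t.count c % 2 = 1) := by
    intro c hc
    have hne : ¬ b = c := fun h => (Finset.mem_erase.mp hc).1 h.symm
    simp [hne]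
  rw [Finset.filter_congr (fun c hc => by rw [hcongr c hc])]
  by_cases hp : (b :: t).count b % 2 = 1
  · rw [if_pos hp, if_pos (by omega : (t.count b + 1) % 2 = 1)]
    rw [Finset.card_insert_of_notMem
      (fun h => (Finset.mem_erase.mp (Finset.mem_of_mem_filter _ h)).1 rfl)]
    omega
  · rw [if_neg hp, if_neg (by omega : ¬ (t.count b + 1) % 2 = 1)]
    omega

lemma pvOddA_cons_self (a : Char) (t : List Char) : pvOddA (a :: t) a = pvOddA t a := by
  unfold pvOddA
  have hset : (a :: t).toFinset.erase a = t.toFinset.erase a := by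
    ext c; simp
  rw [hset]
  refine congrArg Finset.card (Finset.filter_congr ?_)
  intro c hc
  have hne : ¬ a = c := fun h => (Finset.mem_erase.mp hc).1 h.symm
  simp [hne]

lemma pvScan_sorted : ∀ (s : List Char), s.Pairwise (· ≤ ·) →
    ∀ (o r : Int) (a : Char), (∀ c ∈ s, a ≤ c) →
    pvScan s (o, r, some a) = o + (r + (s.count a : Int)) % 2 + (pvOddA s a : Int) := by
  intro s
  induction s with
  | nil =>
    intro _ o r a _
    simp [pvScan, pvOddA]
  | cons b t ih =>
    intro hs o r a ha
    have hb : ∀ c ∈ t, b ≤ c := fun c hc => (List.pairwise_cons.mp hs).1 c hc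
    have ht : t.Pairwise (· ≤ ·) := (List.pairwise_cons.mp hs).2
    by_cases hba : b = a
    · subst hba
      have hstep : pvScan (b :: t) (o, r, some b) = pvScan t (o, r + 1, some b) := by
        simp [pvScan, pvStep]
      rw [hstep, ih ht o (r + 1) b hb]
      have hc : (b :: t).count b = t.count b + 1 := by simp
      rw [hc, pvOddA_cons_self]
      push_cast
      ring_nf
    · have hab : a ≤ b := ha b (List.mem_cons_self)
      have hnat : a ∉ t := fun hmem => hba (le_antisymm hab (hb a hmem)).symm
      have hab' : ¬ a = b := fun h => hba h.symm
      have hstep : pvScan (b :: t) (o, r, some a) = pvScan t (o + r % 2, 1, some b) := by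
        simp [pvScan, pvStep, hba]
      rw [hstep, ih ht (o + r % 2) 1 b hb]
      have hca : (b :: t).count a = 0 := by
        simp [List.count_eq_zero.mpr hnat, hba]
      have hA : pvOddA (b :: t) a = pvOdd (b :: t) := by
        apply pvOddA_of_not_mem
        simp [hnat, hab']
      rw [hca, hA, pvOdd_cons]
      by_cases hp : (t.count b + 1) % 2 = 1
      · rw [if_pos hp]
        have h1 : ((1 : Int) + (t.count b : Int)) % 2 = 1 := by omega
        rw [h1]; push_cast; ring_nf
      · rw [if_neg hp]
        have h0 : ((1 : Int) + (t.count b : Int)) % 2 = 0 := by omega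
        rw [h0]; push_cast; ring_nf

lemma pvScan_init (s : List Char) (hs : s.Pairwise (· ≤ ·)) :
    pvScan s (0, 0, none) = (pvOdd s : Int) := by
  cases s with
  | nil => simp [pvScan, pvOdd]
  | cons b t =>
    have hb : ∀ c ∈ t, b ≤ c := fun c hc => (List.pairwise_cons.mp hs).1 c hc
    have ht : t.Pairwise (· ≤ ·) := (List.pairwise_cons.mp hs).2
    have hstep : pvScan (b :: t) (0, 0, none) = pvScan t (0, 1, some b) := by
      simp [pvScan, pvStep]
    rw [hstep, pvScan_sorted t ht 0 1 b hb, pvOdd_cons]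
    by_cases hp : (t.count b + 1) % 2 = 1
    · rw [if_pos hp]
      have h1 : ((1 : Int) + (t.count b : Int)) % 2 = 1 := by omega
      rw [h1]; push_cast; ring
    · rw [if_neg hp]
      have h0 : ((1 : Int) + (t.count b : Int)) % 2 = 0 := by omega
      rw [h0]; push_cast; ring

lemma pvScan_init' (s : List Char) (hs : s.Pairwise (· ≤ ·)) :
    (s.foldl pvStep (0, 0, none)).1 + (s.foldl pvStep (0, 0, none)).2.1 % 2 = (pvOdd s : Int) :=
  pvScan_init s hs

lemma pvOdd_perm {s t : List Char} (h : s.Perm t) : pvOdd s = pvOdd t := by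
  unfold pvOdd
  have hset : s.toFinset = t.toFinset := by
    ext c; simp [h.mem_iff]
  rw [hset]
  refine congrArg Finset.card (Finset.filter_congr ?_)
  intro c _
  rw [h.count_eq]

-- A's per-word odd_count equals pvOdd
lemma pvA_odd (w : List Char) :
    ((((w.foldl (fun d c => d.insert c (d.getD c 0 + 1)) PySem.Dict.empty : PySem.Dict Char Int).values.filter
        (fun n => n % 2 != 0)).length : Int)) = (pvOdd w : Int) := by
  have hc : (List.foldl (fun d c => d.insert c (d.getD c 0 + 1)) PySem.Dict.empty w)
      = PySem.Dict.counter w := rfl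
  rw [hc]
  have hA : (PySem.Dict.counter w).values.filter (fun n => n % 2 != 0)
      = List.map (fun k => ((List.count k w : Int)))
          ((PySem.Set.ofList w).filter (fun k => ((List.count k w : Int)) % 2 != 0)) := by
    rw [PySem.Dict.values, PySem.Dict.items_counter, List.map_map, List.filter_map]
    rfl
  rw [hA, List.length_map]
  have hnodup : ((PySem.Set.ofList w).filter (fun k => ((List.count k w : Int)) % 2 != 0)).Nodup :=
    (PySem.Set.nodup_ofList w).filter _
  rw [← List.toFinset_card_of_nodup hnodup]
  have hset : ((PySem.Set.ofList w).filter (fun k => ((List.count k w : Int)) % 2 != 0)).toFinset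
      = w.toFinset.filter (fun c => w.count c % 2 = 1) := by
    ext c
    simp only [List.mem_toFinset, List.mem_filter, Finset.mem_filter, PySem.Set.mem_ofList,
      bne_iff_ne, ne_eq]
    constructor
    · rintro ⟨h1, h2⟩
      exact ⟨h1, by omega⟩
    · rintro ⟨h1, h2⟩
      exact ⟨h1, by omega⟩
  rw [hset]
  rfl

-- ===== VERDICT (by name: the statement is the Claim_ definition above) =====
theorem count_palindromic_anagrams_spec : Claim_equal_count_palindromic_anagrams := by
  intro text _
  unfold Spec_count_palindromic_anagrams count_palindromic_anagrams count_palindromic_anagrams_alt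
  congr 1
  funext counter word
  dsimp only
  have hlam : (fun (st : Int × Int × Option Char) c =>
      if some c = st.2.2 then (st.1, st.2.1 + 1, st.2.2)
      else (st.1 + st.2.1 % 2, 1, some c)) = pvStep := rfl
  have hsorted : (PySem.List.sorted word.toList (fun c => c) false).Pairwise (· ≤ ·) := by
    simpa using PySem.List.sorted_pairwise word.toList (fun c => c)
  rw [pvA_odd word.toList, hlam, pvScan_init' _ hsorted,
    pvOdd_perm (PySem.List.sorted_perm word.toList (fun c => c) false)]
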